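-- pv_equiv track=rewrite | github.com/j8267643/code-gen | code_gen/skill_executor.py | _generate_commit_suggestions
-- ===== SOURCE A (Python) =====
-- from typing import Dict, List, Optional, Callable, Any
--
-- def _generate_commit_suggestions(files: List[str]) -> List[str]:
--     """生成提交信息建议"""
--     suggestions = []
--
--     # 根据文件类型生成建议
--     has_py = any(f.endswith('.py') for f in files)
--     has_js = any(f.endswith('.js') or f.endswith('.ts') for f in files)
--     has_test = any('test' in f.lower() for f in files)
--     has_doc = any(f.endswith('.md') or f.endswith('.rst') for f in files)
--
--     if has_test:
--         suggestions.append("Add/update tests")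
--     if has_doc:
--         suggestions.append("Update documentation")
--     if has_py:
--         suggestions.append("Update Python code")
--     if has_js:
--         suggestions.append("Update JavaScript/TypeScript code")
--
--     if not suggestions:
--         suggestions.append("Update files")
--
--     suggestions.append(f"Update {len(files)} files")
--
--     return suggestions
-- ===== SOURCE B (Python) =====
-- from typing import List
--
-- _LABELS = ["Add/update tests", "Update documentation",
--            "Update Python code", "Update JavaScript/TypeScript code"]
--
-- def _classify(f: str) -> set:
--     """Category indices (in _LABELS order) that a single file triggers."""
--     cats = set()
--     if 'test' in f.lower():
--         cats.add(0)
--     if f.endswith('.md') or f.endswith('.rst'):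
--         cats.add(1)
--     if f.endswith('.py'):
--         cats.add(2)
--     if f.endswith('.js') or f.endswith('.ts'):
--         cats.add(3)
--     return cats
--
-- def _generate_commit_suggestions(files: List[str]) -> List[str]:
--     matched = set()
--     for f in files:
--         matched |= _classify(f)
--     base = [_LABELS[i] for i in sorted(matched)] if matched else ["Update files"]
--     return base + [f"Update {len(files)} files"]
-- ===== Notes on version B (the rewrite author's own statement) =====
-- stated objective: alternative
-- what changed: Instead of four independent any() scans building booleans, B classifies each file into a set of category indices, unions those sets over the files, and renders the suggestions by sorting the index set and indexing a label table.
import Mathlib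
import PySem

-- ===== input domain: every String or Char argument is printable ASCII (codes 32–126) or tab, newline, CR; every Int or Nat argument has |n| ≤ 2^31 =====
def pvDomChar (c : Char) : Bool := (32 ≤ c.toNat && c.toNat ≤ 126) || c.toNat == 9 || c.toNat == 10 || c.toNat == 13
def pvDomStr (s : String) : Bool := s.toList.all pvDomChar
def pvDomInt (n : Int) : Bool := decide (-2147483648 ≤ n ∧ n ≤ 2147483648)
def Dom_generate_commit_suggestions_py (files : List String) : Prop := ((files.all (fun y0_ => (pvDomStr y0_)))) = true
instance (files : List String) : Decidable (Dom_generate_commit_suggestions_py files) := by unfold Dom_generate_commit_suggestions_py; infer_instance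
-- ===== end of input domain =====

-- B classifies each file into a set of category indices, unions them, and renders labels from a table via sorted(set) — instead of A's four any() scans (objective: alternative).

-- ===== PORT A =====
def generate_commit_suggestions_py (files : List String) : List String :=
  let suggestions : List String := []
  let has_py := files.any (fun f => PySem.Str.endswith f ".py")
  let has_js := files.any (fun f => PySem.Str.endswith f ".js" || PySem.Str.endswith f ".ts")
  let has_test := files.any (fun f => PySem.Str.isIn "test" (PySem.Str.lower f))
  let has_doc := files.any (fun f => PySem.Str.endswith f ".md" || PySem.Str.endswith f ".rst")
  let suggestions := if has_test then suggestions ++ ["Add/update tests"] else suggestions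
  let suggestions := if has_doc then suggestions ++ ["Update documentation"] else suggestions
  let suggestions := if has_py then suggestions ++ ["Update Python code"] else suggestions
  let suggestions := if has_js then suggestions ++ ["Update JavaScript/TypeScript code"] else suggestions
  let suggestions := if suggestions.isEmpty then suggestions ++ ["Update files"] else suggestions
  suggestions ++ ["Update " ++ PySem.Int.toStr (files.length : Int) ++ " files"]

-- ===== PORT B =====
def pvLabels : List String :=
  ["Add/update tests", "Update documentation", "Update Python code", "Update JavaScript/TypeScript code"]

def pvClassify (f : String) : PySem.Set Int :=
  let cats : PySem.Set Int := PySem.Set.empty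
  let cats := if PySem.Str.isIn "test" (PySem.Str.lower f) then PySem.Set.add cats 0 else cats
  let cats := if PySem.Str.endswith f ".md" || PySem.Str.endswith f ".rst" then PySem.Set.add cats 1 else cats
  let cats := if PySem.Str.endswith f ".py" then PySem.Set.add cats 2 else cats
  let cats := if PySem.Str.endswith f ".js" || PySem.Str.endswith f ".ts" then PySem.Set.add cats 3 else cats
  cats

def generate_commit_suggestions_py_alt (files : List String) : List String :=
  let matched : PySem.Set Int :=
    files.foldl (fun m f => PySem.Set.union m (pvClassify f)) PySem.Set.empty
  let base :=
    if matched.isEmpty then ["Update files"]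
    else (PySem.List.sorted matched (fun i => i) false).map
           (fun i => PySem.List.pyGetD pvLabels i "")
  base ++ ["Update " ++ PySem.Int.toStr (files.length : Int) ++ " files"]

-- ===== PRECONDITION & SPEC =====
def Spec_generate_commit_suggestions_py (files : List String) (out : List String) : Prop := out = generate_commit_suggestions_py_alt files
instance (files : List String) (out : List String) : Decidable (Spec_generate_commit_suggestions_py files out) := by unfold Spec_generate_commit_suggestions_py; infer_instance

-- ===== CLAIM (what is proved, stated in full; the proofs are below) =====
def Claim_equal_generate_commit_suggestions_py : Prop := ∀ (files : List String), Dom_generate_commit_suggestions_py files → Spec_generate_commit_suggestions_py files (generate_commit_suggestions_py files)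

-- ===== LEMMAS AND PROOFS =====

theorem pv_or_shuffle (S e1 e2 e3 e4 f1 f2 f3 f4 t1 t2 t3 t4 : Prop) :
    ((S ∨ (e1 ∧ f1) ∨ (e2 ∧ f2) ∨ (e3 ∧ f3) ∨ (e4 ∧ f4)) ∨
       (e1 ∧ t1) ∨ (e2 ∧ t2) ∨ (e3 ∧ t3) ∨ (e4 ∧ t4)) ↔
      S ∨ (e1 ∧ (f1 ∨ t1)) ∨ (e2 ∧ (f2 ∨ t2)) ∨ (e3 ∧ (f3 ∨ t3)) ∨ (e4 ∧ (f4 ∨ t4)) := by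
  tauto

theorem pv_mem_classify (f : String) (x : Int) :
    x ∈ pvClassify f ↔
      (x = 0 ∧ PySem.Str.isIn "test" (PySem.Str.lower f)) ∨
      (x = 1 ∧ (PySem.Str.endswith f ".md" || PySem.Str.endswith f ".rst")) ∨
      (x = 2 ∧ PySem.Str.endswith f ".py") ∨
      (x = 3 ∧ (PySem.Str.endswith f ".js" || PySem.Str.endswith f ".ts")) := by
  unfold pvClassify
  split_ifs with h1 h2 h3 h4 <;>
    simp_all [PySem.Set.empty]

theorem pv_mem_matched (files : List String) (s : PySem.Set Int) (x : Int) :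
    x ∈ files.foldl (fun m f => PySem.Set.union m (pvClassify f)) s ↔
      x ∈ s ∨
      (x = 0 ∧ files.any (fun f => PySem.Str.isIn "test" (PySem.Str.lower f))) ∨
      (x = 1 ∧ files.any (fun f => PySem.Str.endswith f ".md" || PySem.Str.endswith f ".rst")) ∨
      (x = 2 ∧ files.any (fun f => PySem.Str.endswith f ".py")) ∨
      (x = 3 ∧ files.any (fun f => PySem.Str.endswith f ".js" || PySem.Str.endswith f ".ts")) := by
  induction files generalizing s with
  | nil => simp
  | cons f t ih =>
    simp only [List.foldl_cons, List.any_cons, ih, PySem.Set.mem_union, pv_mem_classify,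
      Bool.or_eq_true]
    exact pv_or_shuffle _ _ _ _ _ _ _ _ _ _ _ _ _

theorem pv_nodup_matched (files : List String) (s : PySem.Set Int) (hs : s.Nodup) :
    (files.foldl (fun m f => PySem.Set.union m (pvClassify f)) s).Nodup := by
  induction files generalizing s with
  | nil => exact hs
  | cons f t ih =>
    exact ih _ (PySem.Set.nodup_union _ _ hs)

theorem pv_mem_ite_single (c : Prop) [Decidable c] (a k : Int) :
    a ∈ (if c then [k] else []) ↔ a = k ∧ c := by
  split_ifs with h <;> simp [h]

theorem pv_sorted_matched (files : List String) :
    PySem.List.sorted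
        (files.foldl (fun m f => PySem.Set.union m (pvClassify f)) PySem.Set.empty)
        (fun i => i) false =
      (if files.any (fun f => PySem.Str.isIn "test" (PySem.Str.lower f)) then [(0:Int)] else []) ++
      (if files.any (fun f => PySem.Str.endswith f ".md" || PySem.Str.endswith f ".rst") then [1] else []) ++
      (if files.any (fun f => PySem.Str.endswith f ".py") then [2] else []) ++
      (if files.any (fun f => PySem.Str.endswith f ".js" || PySem.Str.endswith f ".ts") then [3] else []) := by
  apply PySem.List.sorted_eq_of_perm_of_pairwise_lt
  · rw [List.perm_ext_iff_of_nodup (by split_ifs <;> decide)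
      (pv_nodup_matched files PySem.Set.empty (by decide))]
    intro a
    rw [pv_mem_matched]
    simp only [List.mem_append, pv_mem_ite_single, PySem.Set.empty, List.mem_nil_iff,
      false_or, or_assoc]
  · split_ifs <;> decide

-- ===== VERDICT (by name: the statement is the Claim_ definition above) =====
theorem generate_commit_suggestions_py_spec : Claim_equal_generate_commit_suggestions_py := by
  intro files _
  unfold Spec_generate_commit_suggestions_py
  simp only [generate_commit_suggestions_py, generate_commit_suggestions_py_alt]
  have hs := pv_sorted_matched files
  by_cases hE : files.foldl (fun m f => PySem.Set.union m (pvClassify f)) PySem.Set.empty = []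
  · have hT : files.any (fun f => PySem.Str.isIn "test" (PySem.Str.lower f)) = false := by
      cases hc : files.any (fun f => PySem.Str.isIn "test" (PySem.Str.lower f)) with
      | false => rfl
      | true =>
        exact absurd ((pv_mem_matched files PySem.Set.empty 0).mpr
          (Or.inr (Or.inl ⟨rfl, hc⟩))) (by rw [hE]; simp)
    have hD : files.any (fun f => PySem.Str.endswith f ".md" || PySem.Str.endswith f ".rst") = false := by
      cases hc : files.any (fun f => PySem.Str.endswith f ".md" || PySem.Str.endswith f ".rst") with
      | false => rfl
      | true =>
        exact absurd ((pv_mem_matched files PySem.Set.empty 1).mpr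
          (Or.inr (Or.inr (Or.inl ⟨rfl, hc⟩)))) (by rw [hE]; simp)
    have hP : files.any (fun f => PySem.Str.endswith f ".py") = false := by
      cases hc : files.any (fun f => PySem.Str.endswith f ".py") with
      | false => rfl
      | true =>
        exact absurd ((pv_mem_matched files PySem.Set.empty 2).mpr
          (Or.inr (Or.inr (Or.inr (Or.inl ⟨rfl, hc⟩))))) (by rw [hE]; simp)
    have hJ : files.any (fun f => PySem.Str.endswith f ".js" || PySem.Str.endswith f ".ts") = false := by
      cases hc : files.any (fun f => PySem.Str.endswith f ".js" || PySem.Str.endswith f ".ts") with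
      | false => rfl
      | true =>
        exact absurd ((pv_mem_matched files PySem.Set.empty 3).mpr
          (Or.inr (Or.inr (Or.inr (Or.inr ⟨rfl, hc⟩))))) (by rw [hE]; simp)
    simp only [hE, hT, hD, hP, hJ]
    simp
  · by_cases h1 : files.any (fun f => PySem.Str.isIn "test" (PySem.Str.lower f)) = true <;>
    by_cases h2 : files.any (fun f => PySem.Str.endswith f ".md" || PySem.Str.endswith f ".rst") = true <;>
    by_cases h3 : files.any (fun f => PySem.Str.endswith f ".py") = true <;>
    by_cases h4 : files.any (fun f => PySem.Str.endswith f ".js" || PySem.Str.endswith f ".ts") = true <;>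
      rw [hs] <;>
      first
      | (simp only [h1, h2, h3, h4] at hs
         exact absurd ((PySem.List.sorted_eq_nil_iff _ _ _).mp (by simpa using hs)) hE)
      | (simp only [h1, h2, h3, h4]
         simp only [PySem.Set.empty] at hE
         simp [hE, pvLabels, PySem.List.pyGetD, PySem.List.pyGet?, PySem.List.pyIdx?,
           PySem.Set.empty])
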